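-- pv_equiv track=rewrite | github.com/loudsheep/matura | informatyka/zbiur_zadan/rozw/64/3.py | count_incorrect_cols
-- ===== SOURCE A (Python) =====
-- def count_incorrect_cols(obrazek):
--     count = 0
--     for col in range(len(obrazek) - 1):
--         true_count = 0
--         for row in range(len(obrazek) - 1):
--             if obrazek[row][col] == "1":
--                 true_count += 1
--         true_count = "0" if true_count % 2 == 0 else "1"
--         if true_count != obrazek[len(obrazek) - 1][col]:
--             count += 1
--     return count
-- ===== SOURCE B (Python) =====
-- def count_incorrect_cols(obrazek):
--     n = len(obrazek)
--     if n == 0: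
--         return 0
--     w = n - 1
--     odd = set()
--     for row in obrazek[:w]:
--         odd ^= {j for j in range(w) if row[j] == "1"}
--     last = obrazek[w]
--     return sum(1 for j in range(w) if ("1" if j in odd else "0") != last[j])
-- ===== Notes on version B (the rewrite author's own statement) =====
-- stated objective: alternative
-- what changed: B tracks the set of odd-parity columns as a set of indices, folding each data row in with symmetric difference of the row's set of '1'-columns, then counts columns whose resulting parity bit disagrees with the last row; A instead rescans the whole grid column by column with an integer counter and a modulo test.
import Mathlib
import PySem

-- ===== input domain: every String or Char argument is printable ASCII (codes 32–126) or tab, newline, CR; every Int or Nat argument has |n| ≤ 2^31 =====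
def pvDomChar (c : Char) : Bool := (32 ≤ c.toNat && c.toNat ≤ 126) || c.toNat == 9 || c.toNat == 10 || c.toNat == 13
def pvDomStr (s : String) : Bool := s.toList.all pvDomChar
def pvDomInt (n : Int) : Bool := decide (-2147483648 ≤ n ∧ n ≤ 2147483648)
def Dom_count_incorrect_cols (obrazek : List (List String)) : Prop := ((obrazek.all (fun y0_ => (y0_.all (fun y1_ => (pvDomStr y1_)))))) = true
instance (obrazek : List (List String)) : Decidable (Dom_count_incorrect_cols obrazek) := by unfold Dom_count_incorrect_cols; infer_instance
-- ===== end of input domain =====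

-- B tracks the set of odd-parity column indices by folding rows in with set symmetric difference,
-- then counts disagreements with the last row ("alternative": different data structure, same cost).

-- ===== PORT A =====
def count_incorrect_cols (obrazek : List (List String)) : Int :=
  (PySem.List.pyRange 0 ((obrazek.length : Int) - 1) 1).foldl (fun count col =>
    let tc : Int :=
      (PySem.List.pyRange 0 ((obrazek.length : Int) - 1) 1).foldl (fun tc row =>
        if PySem.List.pyGetD (PySem.List.pyGetD obrazek row []) col "" = "1" then tc + 1 else tc) (0:Int)
    let tcS : String := if PySem.Int.mod tc 2 = 0 then "0" else "1"
    if tcS ≠ PySem.List.pyGetD (PySem.List.pyGetD obrazek ((obrazek.length : Int) - 1) []) col "" then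
      count + 1
    else count) 0

-- ===== PORT B =====
def count_incorrect_cols_alt (obrazek : List (List String)) : Int :=
  let n := obrazek.length
  if n = 0 then 0 else
  let w : Int := (n : Int) - 1
  let odd : PySem.Set Int :=
    (PySem.List.slice obrazek none (some w)).foldl
      (fun odd row => PySem.Set.symmDiff odd
        (PySem.Set.ofList ((PySem.List.pyRange 0 w 1).filter
          (fun j => PySem.List.pyGetD row j "" == "1"))))
      PySem.Set.empty
  let last := PySem.List.pyGetD obrazek w []
  (PySem.List.pyRange 0 w 1).foldl (fun s j =>
    if (if PySem.Set.contains odd j then "1" else "0") ≠ PySem.List.pyGetD last j "" then s + 1 else s) 0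

-- ===== PRECONDITION & SPEC =====
-- Pre_ excludes exactly the inputs where Python A raises IndexError: a grid with at least two rows
-- in which some row is shorter than len(obrazek)-1 columns.
def Pre_count_incorrect_cols (obrazek : List (List String)) : Prop :=
  ∀ r ∈ obrazek, obrazek.length - 1 ≤ r.length
instance (obrazek : List (List String)) : Decidable (Pre_count_incorrect_cols obrazek) := by
  unfold Pre_count_incorrect_cols; infer_instance

def pvWitness_count_incorrect_cols : List (List String) := [["1", "0"], ["0", "0"]]

def Spec_count_incorrect_cols (obrazek : List (List String)) (out : Int) : Prop := out = count_incorrect_cols_alt obrazek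
instance (obrazek : List (List String)) (out : Int) : Decidable (Spec_count_incorrect_cols obrazek out) := by unfold Spec_count_incorrect_cols; infer_instance

-- ===== CLAIM (what is proved, stated in full; the proofs are below) =====
def Claim_equal_count_incorrect_cols : Prop := ∀ (obrazek : List (List String)), Dom_count_incorrect_cols obrazek → Pre_count_incorrect_cols obrazek → Spec_count_incorrect_cols obrazek (count_incorrect_cols obrazek)

-- ===== LEMMAS AND PROOFS =====

-- membership in B's folded symmetric-difference set is the parity (xor) of the initial membership
-- and the oddness of the column's one-count over the processed rows
lemma mem_fold_symmDiff (w : Nat) (rows : List (List String)) : ∀ (s : List Int) (j : Nat), j < w →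
    ((j : Int) ∈ rows.foldl
      (fun odd row => PySem.Set.symmDiff odd
        (PySem.Set.ofList ((PySem.List.pyRange 0 (w : Int) 1).filter
          (fun i => PySem.List.pyGetD row i "" == "1")))) s
     ↔ Xor' ((j : Int) ∈ s)
        (rows.countP (fun row => PySem.List.pyGetD row (j : Int) "" == "1") % 2 = 1)) := by
  induction rows with
  | nil => intro s j hj; simp [Xor']
  | cons row rs ih =>
      intro s j hj
      rw [List.foldl_cons, ih _ j hj]
      have hmem : ((j : Int) ∈ PySem.Set.symmDiff s
          (PySem.Set.ofList ((PySem.List.pyRange 0 (w : Int) 1).filter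
            (fun i => PySem.List.pyGetD row i "" == "1"))))
          ↔ Xor' ((j : Int) ∈ s) (PySem.List.pyGetD row (j : Int) "" == "1") := by
        rw [PySem.Set.mem_symmDiff, PySem.Set.mem_ofList, List.mem_filter,
          PySem.List.mem_pyRange_one]
        have h0 : (0 : Int) ≤ (j : Int) := by positivity
        have h1 : (j : Int) < (w : Int) := by exact_mod_cast hj
        constructor
        · rintro (⟨hs, hn⟩ | ⟨⟨_, hp⟩, hns⟩)
          · exact Or.inl ⟨hs, fun hp => hn ⟨⟨h0, h1⟩, hp⟩⟩
          · exact Or.inr ⟨hp, hns⟩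
        · rintro (⟨hs, hn⟩ | ⟨hp, hns⟩)
          · exact Or.inl ⟨hs, fun h => hn h.2⟩
          · exact Or.inr ⟨⟨⟨h0, h1⟩, hp⟩, hns⟩
      rw [hmem, List.countP_cons]
      by_cases hp : PySem.List.pyGetD row (j : Int) "" == "1"
      · have : (rs.countP (fun row => PySem.List.pyGetD row (j : Int) "" == "1") + 1) % 2 = 1
            ↔ ¬ (rs.countP (fun row => PySem.List.pyGetD row (j : Int) "" == "1") % 2 = 1) := by
          omega
        simp only [hp, Xor', if_true]
        rw [this]
        tauto
      · simp only [hp, Bool.false_eq_true, if_false, Nat.add_zero, Xor']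
        tauto

-- A's inner per-column rescan equals the one-count over the first w rows, as an Int
lemma tc_eq_countP (obrazek : List (List String)) (m : Nat) (hm : m ≤ obrazek.length) (j : Int) :
    (PySem.List.pyRange 0 (m : Int) 1).foldl
      (fun tc row => if PySem.List.pyGetD (PySem.List.pyGetD obrazek row []) j "" = "1"
        then tc + 1 else tc) (0 : Int)
    = (((obrazek.take m).countP (fun row => PySem.List.pyGetD row j "" == "1") : Nat) : Int) := by
  have h1 : (PySem.List.pyRange 0 (m : Int) 1).foldl
      (fun tc row => if PySem.List.pyGetD (PySem.List.pyGetD obrazek row []) j "" = "1"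
        then tc + 1 else tc) (0 : Int)
      = (PySem.List.pyRange 0 (m : Int) 1).foldl
      (fun tc row => if PySem.List.pyGetD (PySem.List.pyGetD (obrazek.take m) row []) j "" = "1"
        then tc + 1 else tc) (0 : Int) := by
    refine PySem.List.foldl_congr_mem _ _ _ _ ?_
    intro acc row hrow
    rw [PySem.List.mem_pyRange_one] at hrow
    obtain ⟨i, rfl, hi⟩ : ∃ i : Nat, row = (i : Int) ∧ i < m := by
      refine ⟨row.toNat, ?_, ?_⟩ <;> omega
    have : PySem.List.pyGetD (obrazek.take m) (i : Int) []
        = PySem.List.pyGetD obrazek (i : Int) [] := by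
      rw [PySem.List.pyGetD_natCast, PySem.List.pyGetD_natCast]
      simp [List.getD, hi]
    rw [this]
  have htake : ((obrazek.take m).length : Int) = (m : Int) := by
    simp [List.length_take, Nat.min_eq_left hm]
  have h3 := PySem.List.foldl_pyRange_zero_pyGetD' (obrazek.take m) []
    (fun tc row => if PySem.List.pyGetD row j "" = "1" then tc + 1 else tc) (0 : Int)
  rw [htake] at h3
  rw [h1, h3, PySem.List.foldl_ite_add_one, zero_add]
  norm_num
  exact List.countP_congr (fun x _ => by by_cases h : PySem.List.pyGetD x j "" = "1" <;> simp [h])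

-- PySem mod on a Nat cast: oddness
lemma mod_two_cast (c : Nat) : (PySem.Int.mod (c : Int) 2 = 0) ↔ ¬ (c % 2 = 1) := by
  have h2 : ((2 : Nat) : Int) = (2 : Int) := by norm_num
  have := PySem.Int.mod_natCast c 2
  rw [h2] at this
  rw [this]
  omega

theorem count_incorrect_cols_spec : Claim_equal_count_incorrect_cols := by
  intro obrazek _ hpre
  unfold Spec_count_incorrect_cols
  cases obrazek with
  | nil => decide
  | cons r rest =>
    set m := rest.length with hm
    have hne : ¬ (r :: rest).length = 0 := by simp
    have hc : (((r :: rest).length : Int)) - 1 = (m : Int) := by simp [hm]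
    simp only [count_incorrect_cols, count_incorrect_cols_alt, hc, if_neg hne,
      PySem.List.slice_to_natCast]
    refine (PySem.List.foldl_congr_mem _ _ _ _ ?_).symm
    intro acc col hcol
    rw [PySem.List.mem_pyRange_one] at hcol
    obtain ⟨j, rfl, hj⟩ : ∃ j : Nat, col = (j : Int) ∧ j < m := by
      refine ⟨col.toNat, ?_, ?_⟩ <;> omega
    rw [tc_eq_countP (r :: rest) m (by simp [hm]) (j : Int)]
    have hparity := mem_fold_symmDiff m ((r :: rest).take m) PySem.Set.empty j hj
    have hcontains : PySem.Set.contains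
        (((r :: rest).take m).foldl
          (fun odd row => PySem.Set.symmDiff odd
            (PySem.Set.ofList ((PySem.List.pyRange 0 (m : Int) 1).filter
              (fun i => PySem.List.pyGetD row i "" == "1")))) PySem.Set.empty) (j : Int)
        = decide ((((r :: rest).take m).countP
            (fun row => PySem.List.pyGetD row (j : Int) "" == "1")) % 2 = 1) := by
      have hempty : ¬ ((j : Int) ∈ (PySem.Set.empty : PySem.Set Int)) := by
        simp [PySem.Set.empty]
      rw [PySem.Set.contains_eq_listContains]
      by_cases hodd : (((r :: rest).take m).countP
          (fun row => PySem.List.pyGetD row (j : Int) "" == "1")) % 2 = 1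
      · simp only [hodd, decide_true]
        have : (j : Int) ∈ ((r :: rest).take m).foldl
            (fun odd row => PySem.Set.symmDiff odd
              (PySem.Set.ofList ((PySem.List.pyRange 0 (m : Int) 1).filter
                (fun i => PySem.List.pyGetD row i "" == "1")))) PySem.Set.empty := by
          rw [hparity]; exact Or.inr ⟨hodd, hempty⟩
        simpa using this
      · simp only [hodd, decide_false]
        have : ¬ ((j : Int) ∈ ((r :: rest).take m).foldl
            (fun odd row => PySem.Set.symmDiff odd
              (PySem.Set.ofList ((PySem.List.pyRange 0 (m : Int) 1).filter
                (fun i => PySem.List.pyGetD row i "" == "1")))) PySem.Set.empty) := by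
          rw [hparity]
          rintro (⟨hs, _⟩ | ⟨ho, _⟩)
          · exact hempty hs
          · exact hodd ho
        simpa using this
    rw [hcontains]
    set c := (((r :: rest).take m).countP
      (fun row => PySem.List.pyGetD row (j : Int) "" == "1")) with hcdef
    by_cases hodd : c % 2 = 1
    · rw [if_neg ((mod_two_cast c).not_left.mpr (by simpa using hodd)),
        hodd]
      simp
    · rw [if_pos ((mod_two_cast c).mpr hodd)]
      simp [hodd]
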